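-- pv_equiv track=rewrite | github.com/yuliiadurytska/Durytska_Lab4 | 4_3.py | normalize_equation
-- ===== SOURCE A (Python) =====
-- def normalize_equation(eq):
--     s = ''
--
--     for c in range(len(eq) - 1):
--
--         if eq[c] == '^':
--             s += '**'
--             continue
--
--         s += eq[c]
--
--         if eq[c + 1] == 'x' and eq[c] in ['1', '2', '3', '4', '5', '6', '7', '8', '9', '0']:
--             s += '*'
--
--     s += eq[-1]
--
--     return s
-- ===== SOURCE B (Python) =====
-- def normalize_equation(eq):
--     s = eq.replace('^', '**')
--     for d in '0123456789':
--         s = s.replace(d + 'x', d + '*x')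
--     return s
-- ===== Notes on version B (the rewrite author's own statement) =====
-- stated objective: idiomatic
-- what changed: A's single index loop with lookahead is replaced by eleven str.replace substitutions (one '^'->'**', then for each digit d, 'dx'->'d*x'); Pre_ excludes only the empty string, on which A raises IndexError; the replace-based passes run in C instead of a per-character Python loop.
-- intended difference: On non-empty inputs whose last character is '^', A returns the string with that final '^' left unexpanded (its loop stops before the last index), e.g. 'x^' for 'x^', while B returns it expanded to '**' ('x**'), which is the intended normalization of the exponent operator. — e.g. on normalize_equation("x^"): A returns "x^", B returns "x**"
import Mathlib
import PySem

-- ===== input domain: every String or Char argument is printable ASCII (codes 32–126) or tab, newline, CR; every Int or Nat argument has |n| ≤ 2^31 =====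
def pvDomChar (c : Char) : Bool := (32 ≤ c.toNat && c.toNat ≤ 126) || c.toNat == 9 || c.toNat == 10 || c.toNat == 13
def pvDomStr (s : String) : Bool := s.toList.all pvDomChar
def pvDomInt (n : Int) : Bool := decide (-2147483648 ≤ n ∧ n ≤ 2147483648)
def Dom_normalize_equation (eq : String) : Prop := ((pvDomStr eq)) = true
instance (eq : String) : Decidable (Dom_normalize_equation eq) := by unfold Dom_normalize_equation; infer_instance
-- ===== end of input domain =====

-- B replaces A's single index loop (with continue and inline lookahead) by eleven
-- str.replace substitutions: '^'->'**' once, then 'dx'->'d*x' for each digit d.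

-- ===== PORT A =====
def pvDigits : List Char := ['1', '2', '3', '4', '5', '6', '7', '8', '9', '0']

def normalize_equation (eq : String) : String :=
  let l := eq.toList
  let s : List Char := (PySem.List.pyRange 0 ((l.length : Int) - 1) 1).foldl (fun s c =>
    if PySem.List.pyGetD l c ' ' = '^' then s ++ ['*', '*']
    else
      let s := s ++ [PySem.List.pyGetD l c ' ']
      if PySem.List.pyGetD l (c + 1) ' ' = 'x' ∧ PySem.List.pyGetD l c ' ' ∈ pvDigits
      then s ++ ['*'] else s) []
  String.ofList (s ++ [PySem.List.pyGetD l (-1) ' '])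

-- ===== PORT B =====
def normalize_equation_alt (eq : String) : String :=
  let s := PySem.Str.replace eq "^" "**"
  ("0123456789".toList).foldl
    (fun s d => PySem.Str.replace s (String.ofList [d, 'x']) (String.ofList [d, '*', 'x'])) s

-- ===== PRECONDITION & SPEC =====
-- Pre_ excludes only the empty string, on which A raises IndexError at eq[-1].
def Pre_normalize_equation (eq : String) : Prop := eq ≠ ""
instance (eq : String) : Decidable (Pre_normalize_equation eq) := by unfold Pre_normalize_equation; infer_instance
def pvWitness_normalize_equation : String := "2x^2+3x=0"

-- On non-empty inputs whose last character is '^', A returns the string with that final '^'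
-- left unexpanded (its loop stops before the last index), e.g. 'x^' for 'x^', while B
-- returns it expanded to '**' ('x**'), which is the intended normalization of the exponent operator.
def D_normalize_equation (eq : String) : Prop := eq ≠ "" ∧ eq.toList.getLast? = some '^'
instance (eq : String) : Decidable (D_normalize_equation eq) := by unfold D_normalize_equation; infer_instance

def Spec_normalize_equation (eq : String) (out : String) : Prop :=
  ¬ D_normalize_equation eq → out = normalize_equation_alt eq
instance (eq : String) (out : String) : Decidable (Spec_normalize_equation eq out) := by unfold Spec_normalize_equation; infer_instance

def pvDiffWitness_normalize_equation : String := "x^"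
def pvDiffWitnessOut_normalize_equation : String × String := ("x^", "x**")

-- ===== CLAIM (what is proved, stated in full; the proofs are below) =====
def Claim_unchanged_normalize_equation : Prop := ∀ (eq : String), Dom_normalize_equation eq → Pre_normalize_equation eq → Spec_normalize_equation eq (normalize_equation eq)
def Claim_changed_normalize_equation : Prop := Dom_normalize_equation (pvDiffWitness_normalize_equation) ∧ Pre_normalize_equation (pvDiffWitness_normalize_equation) ∧ D_normalize_equation (pvDiffWitness_normalize_equation) ∧ normalize_equation (pvDiffWitness_normalize_equation) = pvDiffWitnessOut_normalize_equation.1 ∧ normalize_equation_alt (pvDiffWitness_normalize_equation) = pvDiffWitnessOut_normalize_equation.2 ∧ pvDiffWitnessOut_normalize_equation.1 ≠ pvDiffWitnessOut_normalize_equation.2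
def Claim_exact_normalize_equation : Prop := ∀ (eq : String), Dom_normalize_equation eq → Pre_normalize_equation eq → D_normalize_equation eq → normalize_equation eq ≠ normalize_equation_alt eq

-- ===== LEMMAS AND PROOFS =====

-- A's per-position action on the pair (current char, next char)
def pvG (a b : Char) : List Char :=
  if a = '^' then ['*', '*'] else if b = 'x' ∧ a ∈ pvDigits then [a, '*'] else [a]

-- pair action shared by the insD characterization
def pvPair (p : Char × Char) : List Char :=
  if PySem.Str.isdigit p.1 ∧ p.2 = 'x' then [p.1, '*'] else [p.1]

-- structural form of the caret expansion restricted to all but the last char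
def pvP1 : List Char → List Char
  | [] => []
  | [c] => [c]
  | c :: rest => (if c = '^' then ['*', '*'] else [c]) ++ pvP1 rest

-- caret expansion of EVERY char (what '^'.replace gives)
def pvPass1 (l : List Char) : List Char :=
  l.flatMap (fun c => if c = '^' then ['*', '*'] else [c])

-- a flatMap over adjacent pairs
def pvPairRec (f : Char → Char → List Char) : List Char → List Char
  | a :: b :: r => f a b ++ pvPairRec f (b :: r)
  | _ => []

-- structural form of str.replace (nonempty pattern)
def pvRepl (old new : List Char) : List Char → List Char
  | [] => []
  | c :: t =>
    if old.isPrefixOf (c :: t) ∧ old ≠ [] then new ++ pvRepl old new (t.drop (old.length - 1))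
    else c :: pvRepl old new t
termination_by l => l.length
decreasing_by
  · simp only [List.length_drop, List.length_cons]; omega
  · simp

-- '*' inserted between every P-char and a following 'x'
def pvInsD (P : Char → Bool) : List Char → List Char
  | [] => []
  | [a] => [a]
  | a :: b :: r => (if P a ∧ b = 'x' then [a, '*'] else [a]) ++ pvInsD P (b :: r)

theorem pvGo_eq (old new : List Char) (hold : old ≠ []) :
    ∀ (fuel : Nat) (l acc : List Char), l.length ≤ fuel →
      PySem.Chars.replace.go old new fuel l acc = acc.reverse ++ pvRepl old new l := by
  intro fuel
  induction fuel with
  | zero =>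
      intro l acc hl
      have : l = [] := by cases l <;> simp_all
      subst this
      rw [PySem.Chars.replace.go]; simp [pvRepl]
  | succ fuel ih =>
      intro l acc hl
      cases l with
      | nil => rw [PySem.Chars.replace.go]; simp [pvRepl]; omega
      | cons c t =>
          rw [PySem.Chars.replace.go]
          by_cases hp : old.isPrefixOf (c :: t)
          · have hlen : 1 ≤ old.length := by cases old with | nil => exact absurd rfl hold | cons _ _ => simp
            have hdrop : (c :: t).drop old.length = t.drop (old.length - 1) := by
              cases old with
              | nil => exact absurd rfl hold
              | cons o os => simp
            rw [if_pos hp, hdrop, ih _ _ (by simp only [List.length_drop]; simp at hl; omega)]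
            rw [pvRepl, if_pos ⟨hp, hold⟩]
            simp
          · rw [if_neg hp, ih _ _ (by simp at hl; omega)]
            rw [pvRepl, if_neg (by simp [hp])]
            simp

theorem pvReplace_eq (old new l : List Char) (hold : old ≠ []) :
    PySem.Chars.replace l old new = pvRepl old new l := by
  rw [PySem.Chars.replace, if_neg (by simp [hold]), pvGo_eq old new hold l.length l [] le_rfl]
  simp

theorem pvRepl_caret (l : List Char) : pvRepl ['^'] ['*', '*'] l = pvPass1 l := by
  induction l with
  | nil => simp [pvRepl, pvPass1]
  | cons c t ih =>
      rw [pvRepl]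
      by_cases hc : c = '^'
      · rw [if_pos (by simp [hc, List.isPrefixOf])]
        simp [pvPass1, hc, ih]
      · rw [if_neg (by simp [List.isPrefixOf]; exact fun h => hc h.symm)]
        simp [pvPass1, hc]
        simpa [pvPass1] using ih

theorem pvInsD_congr (P Q : Char → Bool) (h : ∀ c, P c = Q c) (l : List Char) :
    pvInsD P l = pvInsD Q l := by
  have : P = Q := funext h
  rw [this]

theorem pvInsD_head (P : Char → Bool) (b : Char) (r : List Char) :
    ∃ tl, pvInsD P (b :: r) = b :: tl := by
  cases r with
  | nil => exact ⟨[], rfl⟩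
  | cons b' r' =>
      by_cases h : P b ∧ b' = 'x'
      · exact ⟨'*' :: pvInsD P (b' :: r'), by simp [pvInsD, h]⟩
      · exact ⟨pvInsD P (b' :: r'), by simp [pvInsD, h]⟩

theorem pvInsD_x_cons (P : Char → Bool) (hP : P 'x' = false) (r : List Char) :
    pvInsD P ('x' :: r) = 'x' :: pvInsD P r := by
  cases r with
  | nil => simp [pvInsD]
  | cons b' r' => simp [pvInsD, hP]

theorem pvRep2 (d : Char) (hd : PySem.Str.isdigit d = true) (P : Char → Bool)
    (hP : ∀ c, P c = true → PySem.Str.isdigit c = true) :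
    ∀ l : List Char,
      pvRepl [d, 'x'] [d, '*', 'x'] (pvInsD P l) = pvInsD (fun c => P c || c == d) l := by
  have hxd : PySem.Str.isdigit 'x' = false := by decide
  have hsd : PySem.Str.isdigit '*' = false := by decide
  have hPx : P 'x' = false := by
    by_contra h; exact absurd (hP 'x' (by simpa using h)) (by simp [hxd])
  have hdx : d ≠ 'x' := by intro h; rw [h] at hd; exact absurd hd (by simp [hxd])
  have hds : d ≠ '*' := by intro h; rw [h] at hd; exact absurd hd (by simp [hsd])
  have hPx' : (fun c => P c || c == d) 'x' = false := by
    simp [hPx]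
    exact fun h => hdx h.symm
  intro l
  induction hn : l.length using Nat.strong_induction_on generalizing l with
  | _ n ih =>
  cases l with
  | nil => simp [pvInsD, pvRepl]
  | cons a t =>
    cases t with
    | nil =>
        rw [show pvInsD P [a] = [a] from rfl, pvRepl,
          if_neg (by simp [List.isPrefixOf])]
        simp [pvRepl, pvInsD]
    | cons b r =>
      by_cases h1 : P a ∧ b = 'x'
      · -- already separated: a, '*', then pvInsD P (b :: r)
        obtain ⟨hPa, hbx⟩ := h1
        have e1 : pvInsD P (a :: b :: r) = a :: '*' :: pvInsD P (b :: r) := by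
          simp [pvInsD, hPa, hbx]
        rw [e1, pvRepl, if_neg (by simp [List.isPrefixOf]), pvRepl,
          if_neg (by simp [List.isPrefixOf]; intro h; exact (hds (by simp [h])).elim)]
        rw [ih (b :: r).length (by simp at hn ⊢; omega) (b :: r) rfl]
        have e2 : pvInsD (fun c => P c || c == d) (a :: b :: r)
            = a :: '*' :: pvInsD (fun c => P c || c == d) (b :: r) := by
          simp [pvInsD, hPa, hbx]
        rw [e2]
      · by_cases h2 : a = d ∧ b = 'x'
        · -- fresh match: insert the star
          obtain ⟨had, hbx⟩ := h2
          have hPa : P a = false := by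
            by_contra h
            exact h1 ⟨by simpa using h, hbx⟩
          have e1 : pvInsD P (a :: b :: r) = a :: pvInsD P (b :: r) := by
            simp [pvInsD, h1]
          have e2 : pvInsD P (b :: r) = b :: pvInsD P r := by
            subst hbx; exact pvInsD_x_cons P hPx r
          rw [e1, e2, pvRepl, if_pos (by simp [List.isPrefixOf, had, hbx])]
          simp only [List.length_cons, List.length_nil]
          rw [show (2 - 1 : Nat) = 1 from rfl, show (b :: pvInsD P r).drop 1 = pvInsD P r from rfl]
          rw [ih r.length (by simp at hn ⊢; omega) r rfl]
          have e3 : pvInsD (fun c => P c || c == d) (a :: b :: r)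
              = a :: '*' :: pvInsD (fun c => P c || c == d) (b :: r) := by
            simp [pvInsD, had, hbx]
          have e4 : pvInsD (fun c => P c || c == d) (b :: r)
              = b :: pvInsD (fun c => P c || c == d) r := by
            rw [hbx]; exact pvInsD_x_cons _ hPx' r
          rw [e3, e4, had, hbx]
          rfl
        · -- no match at a
          have e1 : pvInsD P (a :: b :: r) = a :: pvInsD P (b :: r) := by
            simp [pvInsD, h1]
          obtain ⟨tl, htl⟩ := pvInsD_head P b r
          rw [e1, htl, pvRepl, if_neg ?nm]
          case nm =>
            rintro ⟨hpre, -⟩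
            simp [List.isPrefixOf] at hpre
            exact h2 ⟨hpre.1.symm, hpre.2.symm⟩
          rw [← htl, ih (b :: r).length (by subst hn; simp) (b :: r) rfl]
          have e2 : pvInsD (fun c => P c || c == d) (a :: b :: r)
              = a :: pvInsD (fun c => P c || c == d) (b :: r) := by
            have : ¬ ((P a || a == d) = true ∧ b = 'x') := by
              rintro ⟨h, hbx⟩
              rcases Bool.or_eq_true_iff.mp h with h | h
              · exact h1 ⟨h, hbx⟩
              · exact h2 ⟨by simpa using h, hbx⟩
            have hcond : ¬((P a || a == d) = true ∧ b = 'x') := this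
            simp only [pvInsD]
            rw [if_neg (by simpa using hcond)]
            simp
          rw [e2]

theorem pvFold_insD (ds : List Char) (hds : ∀ d ∈ ds, PySem.Str.isdigit d = true) :
    ∀ (P : Char → Bool), (∀ c, P c = true → PySem.Str.isdigit c = true) → ∀ l,
      ds.foldl (fun m d => pvRepl [d, 'x'] [d, '*', 'x'] m) (pvInsD P l)
        = pvInsD (fun c => P c || ds.contains c) l := by
  induction ds with
  | nil =>
      intro P hP l
      simp only [List.foldl]
      exact pvInsD_congr _ _ (by simp) l
  | cons d ds ih =>
      intro P hP l
      have hd : PySem.Str.isdigit d = true := hds d (by simp)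
      rw [List.foldl_cons, pvRep2 d hd P hP l,
        ih (fun d' hd' => hds d' (by simp [hd'])) (fun c => P c || c == d)
          (fun c hc => by
            rcases Bool.or_eq_true_iff.mp hc with h | h
            · exact hP c h
            · rw [show c = d from by simpa using h]; exact hd) l]
      exact pvInsD_congr _ _ (fun c => by
        by_cases h : c = d
        · simp [h]
        · have hb : (c == d) = false := by simp [h]
          simp [hb, h]) l

theorem pvInsD_false (l : List Char) : pvInsD (fun _ => false) l = l := by
  induction l using pvInsD.induct with
  | case1 => rfl
  | case2 a => rfl
  | case3 a b r ih => simp [pvInsD, ih]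

theorem pvIsdigit_iff (c : Char) : (PySem.Str.isdigit c = true) ↔ c ∈ pvDigits := by
  simp [PySem.Str.isdigit, PySem.Chars.isdigit, pvDigits, Char.le_def, Char.ext_iff]
  simp [UInt32.le_iff_toNat_le, UInt32.ext_iff]
  omega

theorem pvDigitsLit : "0123456789".toList = ['0','1','2','3','4','5','6','7','8','9'] := rfl

theorem pvContains_digits (c : Char) :
    (("0123456789".toList).contains c) = PySem.Str.isdigit c := by
  rw [pvDigitsLit]
  by_cases h : PySem.Str.isdigit c = true
  · rw [h]
    have hm := (pvIsdigit_iff c).mp h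
    simp [pvDigits] at hm
    simp
    tauto
  · rw [Bool.of_not_eq_true h]
    have hm : c ∉ pvDigits := fun hm => h ((pvIsdigit_iff c).mpr hm)
    simp [pvDigits] at hm
    simp
    tauto

set_option maxRecDepth 4000 in
theorem pvAlt_toList (eq : String) :
    (normalize_equation_alt eq).toList
      = pvInsD (fun c => PySem.Str.isdigit c) (pvPass1 eq.toList) := by
  have hfold : ∀ (ds : List Char) (s : String),
      ((ds.foldl (fun s d => PySem.Str.replace s (String.ofList [d, 'x'])
          (String.ofList [d, '*', 'x'])) s)).toList
        = ds.foldl (fun m d => PySem.Chars.replace m [d, 'x'] [d, '*', 'x']) s.toList := by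
    intro ds
    induction ds with
    | nil => intro s; rfl
    | cons d ds ih => intro s; rw [List.foldl_cons, List.foldl_cons, ih]; simp
  rw [normalize_equation_alt, hfold]
  have h1 : (PySem.Str.replace eq "^" "**").toList = pvPass1 eq.toList := by
    simp only [PySem.Str.replace, String.toList_ofList]
    rw [show ("^" : String).toList = ['^'] from rfl, show ("**" : String).toList = ['*', '*'] from rfl]
    rw [pvReplace_eq _ _ _ (by simp), pvRepl_caret]
  rw [h1]
  have h2 : ∀ (ds : List Char) m, List.foldl (fun m d => PySem.Chars.replace m [d, 'x'] [d, '*', 'x'])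
      m ds = List.foldl (fun m d => pvRepl [d, 'x'] [d, '*', 'x'] m) m ds := by
    intro ds
    induction ds with
    | nil => intro m; rfl
    | cons d ds ih =>
        intro m
        rw [List.foldl_cons, List.foldl_cons, pvReplace_eq _ _ _ (by simp), ih]
  rw [h2, pvDigitsLit]
  have := pvFold_insD ['0','1','2','3','4','5','6','7','8','9']
    (by intro d hd; simp at hd
        rcases hd with rfl|rfl|rfl|rfl|rfl|rfl|rfl|rfl|rfl|rfl <;> decide)
    (fun _ => false) (by simp) (pvPass1 eq.toList)
  rw [pvInsD_false] at this
  rw [this]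
  exact pvInsD_congr _ _ (fun c => by rw [← pvDigitsLit, pvContains_digits c]; simp) _

theorem pvP1_cons_ne (c : Char) (rest : List Char) (h : rest ≠ []) :
    pvP1 (c :: rest) = (if c = '^' then ['*', '*'] else [c]) ++ pvP1 rest := by
  cases rest with
  | nil => exact absurd rfl h
  | cons a r => rfl

theorem pvPass1_eq_pvP1 (l : List Char) (h : l.getLast? ≠ some '^') :
    pvPass1 l = pvP1 l := by
  induction l using pvP1.induct with
  | case1 => rfl
  | case2 c =>
      have : c ≠ '^' := by simpa using h
      simp [pvPass1, pvP1, this]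
  | case3 c rest hr ih =>
      have hne : rest ≠ [] := fun hh => hr hh
      rw [pvP1_cons_ne c rest hne, ← ih (by
        rwa [show (c :: rest) = [c] ++ rest from rfl,
          List.getLast?_append_of_ne_nil _ hne] at h)]
      simp [pvPass1]

theorem pvP1_cons (c : Char) (rest : List Char) :
    ∃ tl, pvP1 (c :: rest) = (if c = '^' ∧ rest ≠ [] then '*' else c) :: tl := by
  cases rest with
  | nil => exact ⟨[], by simp [pvP1]⟩
  | cons c' r =>
      by_cases hc : c = '^'
      · exact ⟨'*' :: pvP1 (c' :: r), by simp [pvP1, hc]⟩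
      · exact ⟨pvP1 (c' :: r), by simp [pvP1, hc]⟩

theorem pvP1_getLast? (l : List Char) : (pvP1 l).getLast? = l.getLast? := by
  induction l using pvP1.induct with
  | case1 => rfl
  | case2 c => rfl
  | case3 c rest hr ih =>
      have hne : rest ≠ [] := fun h => hr h
      have hne' : pvP1 rest ≠ [] := by
        cases rest with
        | nil => exact absurd rfl hne
        | cons a r => obtain ⟨tl, htl⟩ := pvP1_cons a r; simp [htl]
      rw [pvP1_cons_ne c rest hne, List.getLast?_append_of_ne_nil _ hne', ih,
        show (c :: rest) = [c] ++ rest from rfl, List.getLast?_append_of_ne_nil _ hne]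

theorem pvStar_not_digit : PySem.Str.isdigit '*' = false := by decide

theorem pvInsD_pairRec (t : List Char) :
    pvInsD (fun c => PySem.Str.isdigit c) t
      = pvPairRec (fun a b => pvPair (a, b)) t ++ t.getLast?.toList := by
  induction t using pvP1.induct with
  | case1 => rfl
  | case2 c => rfl
  | case3 a rest hr ih =>
      obtain ⟨b, r⟩ : ∃ b r, rest = b :: r := by
        cases rest with
        | nil => exact (hr rfl).elim
        | cons b r => exact ⟨b, r, rfl⟩
      obtain ⟨r, rfl⟩ := r
      rw [show pvInsD (fun c => PySem.Str.isdigit c) (a :: b :: r)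
          = (if PySem.Str.isdigit a ∧ b = 'x' then [a, '*'] else [a])
            ++ pvInsD (fun c => PySem.Str.isdigit c) (b :: r) from rfl,
        ih,
        show pvPairRec (fun a b => pvPair (a, b)) (a :: b :: r)
          = pvPair (a, b) ++ pvPairRec (fun a b => pvPair (a, b)) (b :: r) from rfl,
        pvPair]
      simp

theorem pvCore (l : List Char) :
    pvPairRec (fun a b => pvPair (a, b)) (pvP1 l) = pvPairRec pvG l := by
  induction l using pvP1.induct with
  | case1 => rfl
  | case2 c => rfl
  | case3 c rest hr ih =>
      have hne : rest ≠ [] := fun h => hr h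
      obtain ⟨c', r⟩ : ∃ c' r, rest = c' :: r := by
        cases rest with
        | nil => exact absurd rfl hne
        | cons a b => exact ⟨a, b, rfl⟩
      obtain ⟨r, rfl⟩ := r
      obtain ⟨tl, htl⟩ := pvP1_cons c' r
      have hhead : (if c' = '^' ∧ r ≠ [] then '*' else c') = 'x' ↔ c' = 'x' := by
        by_cases h1 : c' = '^' <;> by_cases h2 : r = [] <;> simp [h1, h2]
      rw [pvP1_cons_ne c _ hne]
      by_cases hc : c = '^'
      · simp only [hc, htl]
        show pvPair ('*', '*') ++ pvPairRec _ ('*' :: _ :: tl) = pvG '^' c' ++ pvPairRec pvG (c' :: r)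
        rw [show pvPairRec (fun a b => pvPair (a, b)) ('*' :: _ :: tl)
              = pvPair ('*', _) ++ pvPairRec (fun a b => pvPair (a, b)) (_ :: tl) from rfl]
        rw [← htl, ih]
        simp [pvPair, pvG, pvStar_not_digit]
      · simp only [if_neg hc, htl]
        show pvPair (c, _) ++ pvPairRec _ (_ :: tl) = pvG c c' ++ pvPairRec pvG (c' :: r)
        rw [← htl, ih]
        congr 1
        simp only [pvPair, pvG, if_neg hc]
        by_cases hd : PySem.Str.isdigit c = true
        · simp only [hd, true_and]
          have hmem := (pvIsdigit_iff c).mp hd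
          by_cases hx : c' = 'x'
          · rw [if_pos (hhead.mpr hx)]; simp [hx, hmem]
          · rw [if_neg (fun h => hx (hhead.mp h))]; simp [hx]
        · have : c ∉ pvDigits := fun h => hd ((pvIsdigit_iff c).mpr h)
          simp [hd, this]

theorem pvA_eq (l : List Char) (hl : l ≠ []) :
    (PySem.List.pyRange 0 ((l.length : Int) - 1) 1).foldl (fun s c =>
      if PySem.List.pyGetD l c ' ' = '^' then s ++ ['*', '*']
      else
        let s := s ++ [PySem.List.pyGetD l c ' ']
        if PySem.List.pyGetD l (c + 1) ' ' = 'x' ∧ PySem.List.pyGetD l c ' ' ∈ pvDigits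
        then s ++ ['*'] else s) [] = pvPairRec pvG l := by
  have hpos : 0 < l.length := List.length_pos_of_ne_nil hl
  have hzlen : (l.zip l.tail).length = l.length - 1 := by
    simp [List.length_zip, List.length_tail]
  have hcast : ((l.length : Int) - 1) = (((l.zip l.tail).length : Int)) := by
    rw [hzlen]; omega
  rw [PySem.List.foldl_congr_mem _ _
      (fun s c => s ++ (fun p : Char × Char => pvG p.1 p.2) (PySem.List.pyGetD (l.zip l.tail) c (' ', ' '))) _ ?_]
  · rw [hcast, PySem.List.foldl_pyRange_zero_pyGetD' (l.zip l.tail) (' ', ' ')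
        (fun acc p => acc ++ pvG p.1 p.2) []]
    rw [PySem.List.foldl_append_eq_flatMap (fun p : Char × Char => pvG p.1 p.2) (l.zip l.tail) []]
    have : ∀ t : List Char, (t.zip t.tail).flatMap (fun p : Char × Char => pvG p.1 p.2)
        = pvPairRec pvG t := by
      intro t
      induction t using pvPairRec.induct with
      | case1 a b r ih => simp [pvPairRec, List.zip, ih.symm]
      | case2 t h => cases t with
        | nil => simp [pvPairRec]
        | cons a r => cases r with
          | nil => simp [pvPairRec]
          | cons b r' => exact absurd rfl (h a b r')
    simp [this l]
  · intro acc c hc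
    obtain ⟨h0, h1⟩ := PySem.List.mem_pyRange_one.mp hc
    have hct : c.toNat < l.length - 1 := by omega
    have hc1 : (0:Int) ≤ c + 1 := by omega
    have hget : PySem.List.pyGetD l c ' ' = l[c.toNat]'(by omega) :=
      PySem.List.pyGetD_eq_getElem l ' ' h0 (by omega)
    have hget1 : PySem.List.pyGetD l (c + 1) ' ' = l[c.toNat + 1]'(by omega) := by
      rw [PySem.List.pyGetD_eq_getElem l ' ' hc1 (by omega)]
      congr 1
      omega
    have hgetz : PySem.List.pyGetD (l.zip l.tail) c (' ', ' ')
        = (l[c.toNat]'(by omega), l[c.toNat + 1]'(by omega)) := by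
      rw [PySem.List.pyGetD_eq_getElem (l.zip l.tail) (' ', ' ') h0 (by rw [hzlen]; omega)]
      rw [List.getElem_zip]
      congr 1
      exact List.getElem_tail ..
    simp only [hget, hget1, hgetz]
    simp only [pvG]
    split_ifs <;> simp [List.append_assoc]

theorem pvA_toList (eq : String) (hl : eq.toList ≠ []) :
    normalize_equation eq
      = String.ofList (pvPairRec pvG eq.toList ++ [eq.toList.getLast hl]) := by
  rw [normalize_equation]
  rw [pvA_eq eq.toList hl, PySem.List.pyGetD_neg_one _ ' ' hl]

-- '^' survives nowhere in B's output
theorem pvCaret_not_mem_pass1 (l : List Char) : '^' ∉ pvPass1 l := by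
  induction l with
  | nil => simp [pvPass1]
  | cons c t ih =>
      simp only [pvPass1, List.flatMap_cons, List.mem_append]
      rintro (h | h)
      · by_cases hc : c = '^'
        · simp [hc] at h
        · simp [hc] at h
          exact hc h.symm
      · exact ih h

theorem pvMem_insD (P : Char → Bool) (c : Char) :
    ∀ m, c ∈ pvInsD P m → c ∈ m ∨ c = '*' := by
  intro m
  induction m using pvInsD.induct with
  | case1 => intro h; simp [pvInsD] at h
  | case2 a => intro h; simp [pvInsD] at h; exact Or.inl (by simp [h])
  | case3 a b r ih =>
      intro h
      simp only [pvInsD, List.mem_append] at h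
      rcases h with h | h
      · by_cases hab : P a ∧ b = 'x'
        · simp [hab] at h
          rcases h with h | h
          · exact Or.inl (by simp [h])
          · exact Or.inr h
        · simp [hab] at h
          exact Or.inl (by simp [h])
      · rcases ih h with h | h
        · exact Or.inl (by simp at h ⊢; tauto)
        · exact Or.inr h

-- ===== VERDICT (by name: the statement is the Claim_ definition above) =====
theorem normalize_equation_spec : Claim_unchanged_normalize_equation := by
  intro eq _ hpre hnd
  have hl : eq.toList ≠ [] := by
    intro h
    exact hpre (by simpa using congrArg String.ofList h)
  have hlast : eq.toList.getLast? ≠ some '^' := by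
    intro h
    exact hnd ⟨hpre, h⟩
  have hB : (normalize_equation_alt eq).toList
      = pvPairRec pvG eq.toList ++ [eq.toList.getLast hl] := by
    rw [pvAlt_toList, pvPass1_eq_pvP1 _ hlast, pvInsD_pairRec, pvCore,
      pvP1_getLast? eq.toList, List.getLast?_eq_some_getLast (l := eq.toList) hl]
    rfl
  rw [pvA_toList eq hl, ← hB]
  simp

set_option maxRecDepth 40000 in
theorem normalize_equation_changed : Claim_changed_normalize_equation := by
  unfold Claim_changed_normalize_equation; decide

theorem normalize_equation_tight : Claim_exact_normalize_equation := by
  intro eq _ hpre hd heq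
  have hl : eq.toList ≠ [] := by
    intro h
    exact hpre (by simpa using congrArg String.ofList h)
  have hlast : eq.toList.getLast hl = '^' := by
    have h2 := List.getLast?_eq_some_getLast (l := eq.toList) hl
    rw [hd.2] at h2
    exact (Option.some.inj h2).symm
  have hmemA : '^' ∈ (normalize_equation eq).toList := by
    rw [pvA_toList eq hl, hlast]
    simp
  have hmemB : '^' ∉ (normalize_equation_alt eq).toList := by
    rw [pvAlt_toList]
    intro h
    rcases pvMem_insD _ '^' _ h with h | h
    · exact pvCaret_not_mem_pass1 _ h
    · exact absurd h (by decide)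
  rw [heq] at hmemA
  exact hmemB hmemA
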